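-- pv_equiv track=rewrite | github.com/familycomicsstudios/calcforshort | calculator/expression.py | _normalize_comparison_syntax
-- ===== SOURCE A (Python) =====
-- _EQ_PREFIX_EXCLUDED: frozenset[str] = frozenset("!<>=+-*/%&|^:@~")
--
-- def _normalize_comparison_syntax(expression: str) -> str:
--     """Rewrite a bare ``=`` (comparison intent) to ``==``.
--
--     Processes the string character-by-character so that ``=`` inside string
--     literals and all compound operators are left unchanged.  Only called on
--     the final *eval* expression, never on exec statements.
--     """
--     parts: list[str] = []
--     index = 0
--     quote: str | None = None
--     escaped = False
--     prev_char = ""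
--
--     while index < len(expression):
--         char = expression[index]
--
--         if quote is not None:
--             parts.append(char)
--             if escaped:
--                 escaped = False
--             elif char == "\\":
--                 escaped = True
--             elif char == quote:
--                 quote = None
--             prev_char = char
--             index += 1
--             continue
--
--         if char in {'"', "'"}:
--             quote = char
--             parts.append(char)
--             prev_char = char
--             index += 1
--             continue
--
--         if char == "=":
--             next_char = expression[index + 1] if index + 1 < len(expression) else ""
--             if prev_char not in _EQ_PREFIX_EXCLUDED and next_char != "=":
--                 parts.append("==")
--             else:
--                 parts.append("=")
--             prev_char = char
--             index += 1
--             continue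
--
--         parts.append(char)
--         prev_char = char
--         index += 1
--
--     return "".join(parts)
-- ===== SOURCE B (Python) =====
-- _EQ_PREFIX_EXCLUDED: frozenset[str] = frozenset("!<>=+-*/%&|^:@~")
--
--
-- def _double_eq(seg: str) -> str:
--     """Double every bare ``=`` in a code-only segment (no quotes inside)."""
--     out = []
--     prev = ""
--     for k, c in enumerate(seg):
--         nxt = seg[k + 1] if k + 1 < len(seg) else ""
--         if c == "=" and prev not in _EQ_PREFIX_EXCLUDED and nxt != "=":
--             out.append("==")
--         else:
--             out.append(c)
--         prev = c
--     return "".join(out)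
--
--
-- def _normalize_comparison_syntax(expression: str) -> str:
--     """Two-phase: split into alternating code / string-literal segments,
--     then rewrite bare ``=`` to ``==`` inside the code segments only."""
--     n = len(expression)
--     pieces = []
--     i = 0
--     while i < n:
--         if expression[i] in "\"'":
--             # string literal: find its end with the escape rule (backslash skips one)
--             q = expression[i]
--             j = i + 1
--             while j < n:
--                 if expression[j] == "\\":
--                     j += 2
--                 elif expression[j] == q:
--                     j += 1
--                     break
--                 else:
--                     j += 1
--             j = min(j, n)
--             pieces.append(expression[i:j])  # verbatim
--             i = j
--         else:
--             j = i
--             while j < n and expression[j] not in "\"'":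
--                 j += 1
--             pieces.append(_double_eq(expression[i:j]))
--             i = j
--     return "".join(pieces)
-- ===== Notes on version B (the rewrite author's own statement) =====
-- stated objective: alternative
-- what changed: B replaces A's single character-by-character loop carrying quote/escape/prev state with a two-phase structure: one scanner splits the expression into alternating code and string-literal segments (consuming each literal, escapes included, in one inner scan), then bare '=' is doubled locally inside each code segment and the pieces are concatenated.
import Mathlib
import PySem

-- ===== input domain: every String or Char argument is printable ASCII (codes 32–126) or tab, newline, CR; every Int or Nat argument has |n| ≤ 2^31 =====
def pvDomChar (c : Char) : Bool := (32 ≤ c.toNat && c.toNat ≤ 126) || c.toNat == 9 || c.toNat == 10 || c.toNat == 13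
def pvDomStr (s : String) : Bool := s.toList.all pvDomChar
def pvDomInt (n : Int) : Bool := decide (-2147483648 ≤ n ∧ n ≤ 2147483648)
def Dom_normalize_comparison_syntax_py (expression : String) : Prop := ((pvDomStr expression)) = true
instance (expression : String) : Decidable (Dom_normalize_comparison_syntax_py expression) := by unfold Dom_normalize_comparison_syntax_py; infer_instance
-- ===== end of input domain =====

-- B replaces A's single stateful scan with a split-into-segments pass plus a local
-- per-code-segment '=' doubling; same output, similar cost (objective: alternative).

-- ===== PORT A =====
-- prev_char = "" is modelled as none; the `in _EQ_PREFIX_EXCLUDED` test: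
def pvExcl (p : Option Char) : Bool :=
  match p with
  | none => false
  | some c => "!<>=+-*/%&|^:@~".toList.contains c

-- A's while loop over the remaining characters; state: quote, escaped, prev_char.
def pvLoopA : List Char → Option Char → Bool → Option Char → List Char
  | [], _, _, _ => []
  | c :: rest, some q, escaped, _ =>
    -- inside a string literal: emit char, update escape/quote state
    if escaped then c :: pvLoopA rest (some q) false (some c)
    else if c == '\\' then c :: pvLoopA rest (some q) true (some c)
    else if c == q then c :: pvLoopA rest none false (some c)
    else c :: pvLoopA rest (some q) false (some c)
  | c :: rest, none, _, prev =>
    if c == '"' || c == '\'' then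
      c :: pvLoopA rest (some c) false (some c)
    else if c == '=' then
      -- next_char = "" (none) when at end of input
      (if !pvExcl prev && rest.head? != some '=' then ['=', '='] else ['=']) ++
        pvLoopA rest none false (some '=')
    else
      c :: pvLoopA rest none false (some c)

def normalize_comparison_syntax_py (expression : String) : String :=
  String.ofList (pvLoopA expression.toList none false none)

-- ===== PORT B =====
-- inner while loop of the string-literal case: consume up to and including the
-- closing quote q (a backslash skips the next character); returns (literal body, rest)
def pvTakeStr (q : Char) : List Char → List Char × List Char
  | [] => ([], [])
  | c :: rest =>
    if c == '\\' then
      match rest with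
      | [] => ([c], [])
      | d :: rest' =>
        let p := pvTakeStr q rest'
        (c :: d :: p.1, p.2)
    else if c == q then ([c], rest)
    else
      let p := pvTakeStr q rest
      (c :: p.1, p.2)

-- inner while loop of the code case: consume up to the next quote character
def pvTakeCode : List Char → List Char × List Char
  | [] => ([], [])
  | c :: rest =>
    if c == '"' || c == '\'' then ([], c :: rest)
    else
      let p := pvTakeCode rest
      (c :: p.1, p.2)

theorem pvTakeStr_len (q : Char) (l : List Char) : (pvTakeStr q l).2.length ≤ l.length := by
  induction hn : l.length using Nat.strong_induction_on generalizing l with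
  | _ n ih =>
  subst hn
  cases l with
  | nil => simp [pvTakeStr]
  | cons c rest =>
      by_cases hb : (c == '\\') = true
      · cases rest with
        | nil => simp [pvTakeStr, hb]
        | cons d rest' =>
            have h2 := ih rest'.length (by simp) rest' rfl
            rw [pvTakeStr.eq_def]
            simp only [hb, if_pos, List.length_cons]
            omega
      · by_cases hq : (c == q) = true
        · rw [pvTakeStr.eq_def]; simp [hb, hq]
        · have h1 := ih rest.length (by simp) rest rfl
          rw [pvTakeStr.eq_def]
          simp only [hb, hq, Bool.false_eq_true, if_false, List.length_cons]
          omega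

theorem pvTakeCode_len (l : List Char) : (pvTakeCode l).2.length ≤ l.length := by
  induction l with
  | nil => simp [pvTakeCode]
  | cons c rest ih =>
      by_cases h : (c == '"' || c == '\'') = true
      · simp [pvTakeCode, h]
      · simp only [pvTakeCode, h, Bool.false_eq_true, if_false, List.length_cons]
        omega

-- B's outer while loop: alternating segments, tagged true = string literal
def pvSegments : List Char → List (Bool × List Char)
  | [] => []
  | c :: rest =>
    if c == '"' || c == '\'' then
      (true, c :: (pvTakeStr c rest).1) :: pvSegments (pvTakeStr c rest).2
    else
      (false, c :: (pvTakeCode rest).1) :: pvSegments (pvTakeCode rest).2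
  termination_by l => l.length
  decreasing_by
  · exact Nat.lt_succ_of_le (pvTakeStr_len c rest)
  · exact Nat.lt_succ_of_le (pvTakeCode_len rest)

-- _double_eq: double each bare '=' in a code segment (prev carried, next by lookahead)
def pvDoubleEq : Option Char → List Char → List Char
  | _, [] => []
  | prev, c :: rest =>
    (if c == '=' && !pvExcl prev && rest.head? != some '=' then ['=', '='] else [c]) ++
      pvDoubleEq (some c) rest

-- join of the pieces: string segments verbatim, code segments through _double_eq
def pvRenderB : List (Bool × List Char) → List Char
  | [] => []
  | (true, s) :: rest => s ++ pvRenderB rest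
  | (false, s) :: rest => pvDoubleEq none s ++ pvRenderB rest

def normalize_comparison_syntax_py_alt (expression : String) : String :=
  String.ofList (pvRenderB (pvSegments expression.toList))

-- ===== PRECONDITION & SPEC =====
def Spec_normalize_comparison_syntax_py (expression : String) (out : String) : Prop := out = normalize_comparison_syntax_py_alt expression
instance (expression : String) (out : String) : Decidable (Spec_normalize_comparison_syntax_py expression out) := by unfold Spec_normalize_comparison_syntax_py; infer_instance

-- ===== CLAIM (what is proved, stated in full; the proofs are below) =====
def Claim_equal_normalize_comparison_syntax_py : Prop := ∀ (expression : String), Dom_normalize_comparison_syntax_py expression → Spec_normalize_comparison_syntax_py expression (normalize_comparison_syntax_py expression)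

-- ===== LEMMAS AND PROOFS =====

-- Inside a string literal, A's loop emits exactly the pvTakeStr segment and leaves
-- the loop with quote = none and prev = the closing quote (prev is never read there).
theorem loopA_string (q : Char) (l : List Char) (p : Option Char) :
    pvLoopA l (some q) false p =
      (pvTakeStr q l).1 ++ pvLoopA (pvTakeStr q l).2 none false (some q) := by
  induction hn : l.length using Nat.strong_induction_on generalizing l p with
  | _ n ih =>
  subst hn
  cases l with
  | nil => simp [pvTakeStr, pvLoopA]
  | cons c rest =>
      by_cases hb : (c == '\\') = true
      · have hc : c = '\\' := by simpa using hb
        subst hc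
        cases rest with
        | nil => simp [pvTakeStr, pvLoopA]
        | cons d rest' =>
            have h2 := ih rest'.length (by simp) rest' (some d) rfl
            rw [pvTakeStr.eq_def]
            simp only [hb, if_pos, pvLoopA, Bool.false_eq_true, if_false]
            simp [h2]
      · by_cases hq : (c == q) = true
        · have hc : c = q := by simpa using hq
          subst hc
          rw [pvTakeStr.eq_def]
          simp [pvLoopA, hb]
        · have h1 := ih rest.length (by simp) rest (some c) rfl
          rw [pvTakeStr.eq_def]
          simp only [pvLoopA, hb, hq, Bool.false_eq_true, if_false]
          simp [h1]

-- heads of a code segment agree with heads of the rest on '=' (a quote is never '=')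
theorem takeCode_head_eq (l : List Char) :
    ((pvTakeCode l).1.head? != some '=') = (l.head? != some '=') := by
  cases l with
  | nil => simp [pvTakeCode]
  | cons c rest =>
      by_cases h : (c == '"' || c == '\'') = true
      · rcases (by simpa using h : c = '"' ∨ c = '\'') with h' | h' <;> subst h' <;>
          simp [pvTakeCode] <;> decide
      · simp [pvTakeCode, h]

-- In code mode, A's loop is _double_eq on the pvTakeCode segment followed by the
-- loop restarted at the next quote (whose branch does not read prev).
theorem loopA_code (l : List Char) (prev : Option Char) :
    pvLoopA l none false prev =
      pvDoubleEq prev (pvTakeCode l).1 ++ pvLoopA (pvTakeCode l).2 none false none := by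
  induction l generalizing prev with
  | nil => simp [pvTakeCode, pvDoubleEq, pvLoopA]
  | cons c rest ih =>
      by_cases h : (c == '"' || c == '\'') = true
      · simp only [pvTakeCode, h, if_pos, pvDoubleEq, List.nil_append, pvLoopA]
      · by_cases he : (c == '=') = true
        · have hc : c = '=' := by simpa using he
          subst hc
          simp only [pvTakeCode, h, Bool.false_eq_true, if_false, pvLoopA, pvDoubleEq, he,
            Bool.true_and, takeCode_head_eq, ih, List.append_assoc]
          simp
        · simp only [pvTakeCode, h, Bool.false_eq_true, if_false, pvLoopA, he, pvDoubleEq,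
            Bool.false_and]
          simp [ih]

-- the first decision of _double_eq only looks at pvExcl of the seed
theorem doubleEq_congr (p p' : Option Char) (l : List Char) (h : pvExcl p = pvExcl p') :
    pvDoubleEq p l = pvDoubleEq p' l := by
  cases l with
  | nil => rfl
  | cons c rest => simp [pvDoubleEq, h]

-- main invariant: from code mode with a non-excluded prev, A's loop = B's pipeline
theorem loopA_eq_renderB (l : List Char) (prev : Option Char) (hp : pvExcl prev = false) :
    pvLoopA l none false prev = pvRenderB (pvSegments l) := by
  induction hn : l.length using Nat.strong_induction_on generalizing l prev with
  | _ n ih =>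
  subst hn
  cases l with
  | nil => simp [pvLoopA, pvSegments, pvRenderB]
  | cons c rest =>
      by_cases h : (c == '"' || c == '\'') = true
      · rw [pvSegments]
        simp only [h, if_pos, pvRenderB]
        simp only [pvLoopA, h, if_pos]
        rw [loopA_string c rest (some c)]
        have hq : pvExcl (some c) = false := by
          rcases (by simpa using h : c = '"' ∨ c = '\'') with h' | h' <;> subst h' <;> decide
        rw [ih (pvTakeStr c rest).2.length
            (by have := pvTakeStr_len c rest; simp; omega) _ (some c) hq rfl]
        simp
      · rw [pvSegments]
        simp only [h, Bool.false_eq_true, if_false, pvRenderB]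
        rw [loopA_code (c :: rest) prev]
        rw [pvTakeCode]
        simp only [h, Bool.false_eq_true, if_false]
        rw [doubleEq_congr prev none _ (by rw [hp]; rfl)]
        rw [ih (pvTakeCode rest).2.length
            (by have := pvTakeCode_len rest; simp; omega) _ none rfl rfl]

-- ===== VERDICT (by name: the statement is the Claim_ definition above) =====
theorem normalize_comparison_syntax_py_spec : Claim_equal_normalize_comparison_syntax_py := by
  intro expression _
  show _ = _
  unfold normalize_comparison_syntax_py normalize_comparison_syntax_py_alt
  rw [loopA_eq_renderB _ none rfl]
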